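-- pv_equiv track=rewrite | github.com/NVIDIA/OpenSeq2Seq | frame_asr.py | greedy_merge
-- ===== SOURCE A (Python) =====
-- def greedy_merge(s, prev_char=''):
--     s_merged = ''
--
--     for i in range(len(s)):
--         if s[i] != prev_char:
--             prev_char = s[i]
--             if prev_char != '_':
--                 s_merged += prev_char
--     return s_merged
-- ===== SOURCE B (Python) =====
-- def _dedup(t):
--     # divide & conquer: collapse each half, then join, dropping the boundary
--     # duplicate when the right half starts with the left half's last char
--     if len(t) <= 1:
--         return t
--     m = len(t) // 2
--     L = _dedup(t[:m])
--     R = _dedup(t[m:])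
--     if R and L and R[0] == L[-1]:
--         R = R[1:]
--     return L + R
--
--
-- def greedy_merge(s, prev_char=''):
--     d = _dedup(s)
--     if d and d[0] == prev_char:
--         d = d[1:]
--     return d.replace('_', '')
-- ===== Notes on version B (the rewrite author's own statement) =====
-- stated objective: alternative
-- what changed: A's left-to-right per-character state machine is replaced by a divide-and-conquer collapse: recursively dedup each half of the string and concatenate the halves, dropping the boundary duplicate; then drop a leading char equal to the seed and strip blanks.
import Mathlib
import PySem

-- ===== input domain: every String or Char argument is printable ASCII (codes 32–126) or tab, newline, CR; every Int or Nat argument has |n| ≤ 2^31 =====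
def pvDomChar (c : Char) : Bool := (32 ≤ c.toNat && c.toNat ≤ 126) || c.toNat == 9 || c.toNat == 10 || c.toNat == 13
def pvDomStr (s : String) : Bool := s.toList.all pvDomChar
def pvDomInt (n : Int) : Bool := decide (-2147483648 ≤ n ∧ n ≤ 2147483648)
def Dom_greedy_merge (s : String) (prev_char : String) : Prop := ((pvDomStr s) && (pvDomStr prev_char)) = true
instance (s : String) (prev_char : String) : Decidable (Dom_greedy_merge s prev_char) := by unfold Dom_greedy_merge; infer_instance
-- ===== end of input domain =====

-- B replaces A's left-to-right per-character state machine with a divide-and-conquer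
-- collapse (dedup each half, join dropping the boundary duplicate), then a seed drop
-- and a blank strip (objective: alternative).

-- ===== PORT A =====
-- A's loop: for each char, if it differs from prev_char, update prev_char and
-- append it to s_merged unless it is '_'.
def greedyA : List Char → String → String → String
  | [], _, acc => acc
  | c :: rest, prev, acc =>
    if String.ofList [c] ≠ prev then
      let prev' := String.ofList [c]
      if prev' ≠ "_" then greedyA rest prev' (acc ++ prev')
      else greedyA rest prev' acc
    else greedyA rest prev acc

def greedy_merge (s : String) (prev_char : String) : String :=
  greedyA s.toList prev_char ""

-- ===== PORT B =====
-- if R and L and R[0] == L[-1]: R = R[1:]; return L + R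
def glue (L R : List Char) : List Char :=
  match R, L.getLast? with
  | k :: rest, some x => if k = x then L ++ rest else L ++ k :: rest
  | _, _ => L ++ R

-- _dedup: divide & conquer collapse of consecutive duplicates
def dedupDC (t : List Char) : List Char :=
  if h : t.length ≤ 1 then t
  else
    glue (dedupDC (t.take (t.length / 2))) (dedupDC (t.drop (t.length / 2)))
termination_by t.length
decreasing_by
  · simp only [List.length_take]; omega
  · simp only [List.length_drop]; omega

def greedy_merge_alt (s : String) (prev_char : String) : String :=
  let d := dedupDC s.toList
  -- if d and d[0] == prev_char: d = d[1:]
  let d2 := match d with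
    | k :: rest => if String.ofList [k] = prev_char then rest else k :: rest
    | [] => []
  -- d.replace('_', '') removes exactly every '_' char: a filter on the chars
  String.ofList (d2.filter (fun k => k ≠ '_'))

-- ===== PRECONDITION & SPEC =====
def Spec_greedy_merge (s : String) (prev_char : String) (out : String) : Prop := out = greedy_merge_alt s prev_char
instance (s : String) (prev_char : String) (out : String) : Decidable (Spec_greedy_merge s prev_char out) := by unfold Spec_greedy_merge; infer_instance

-- ===== CLAIM (what is proved, stated in full; the proofs are below) =====
def Claim_equal_greedy_merge : Prop := ∀ (s : String) (prev_char : String), Dom_greedy_merge s prev_char → Spec_greedy_merge s prev_char (greedy_merge s prev_char)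

-- ===== LEMMAS AND PROOFS =====

-- proof-side linear dedup: the keys of the maximal runs of equal consecutive chars
def runKeysAux : Char → List Char → List Char
  | _, [] => []
  | p, c :: rest => (if c ≠ p then [c] else []) ++ runKeysAux c rest

def runKeys : List Char → List Char
  | [] => []
  | c :: rest => c :: runKeysAux c rest

-- the 'drop a leading key matching prev' step
def dropMatch (p : String) : List Char → List Char
  | k :: rest => if String.ofList [k] = p then rest else k :: rest
  | [] => []

theorem runKeysAux_eq_dropMatch (c : Char) (rest : List Char) :
    runKeysAux c rest = dropMatch (String.ofList [c]) (runKeys rest) := by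
  cases rest with
  | nil => rfl
  | cons d r =>
    simp only [runKeysAux, runKeys, dropMatch, String.ofList_inj]
    by_cases h : d = c
    · subst h; simp
    · simp [h]

theorem greedyA_eq (cs : List Char) :
    ∀ (prev : String) (acc : String),
      greedyA cs prev acc
        = acc ++ String.ofList ((dropMatch prev (runKeys cs)).filter (fun k => k ≠ '_')) := by
  induction cs with
  | nil => intro prev acc; simp [greedyA, runKeys, dropMatch]
  | cons c rest ih =>
    intro prev acc
    simp only [greedyA, runKeys, dropMatch]
    by_cases hp : String.ofList [c] = prev
    · rw [if_neg (fun h => h hp), if_pos hp, ih, ← hp, ← runKeysAux_eq_dropMatch]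
    · rw [if_pos hp, if_neg hp]
      by_cases hc : c = '_'
      · have hu : String.ofList [c] = "_" := by subst hc; rfl
        rw [if_neg (fun h => h hu), ih, ← runKeysAux_eq_dropMatch]
        simp [hc]
      · have hu : String.ofList [c] ≠ "_" := by
          intro h
          exact hc (by simpa using String.ofList_inj.mp (h.trans (rfl : "_" = String.ofList ['_'])))
        rw [if_pos hu, ih, ← runKeysAux_eq_dropMatch]
        rw [List.filter_cons_of_pos (by simpa using hc)]
        rw [show (c :: List.filter (fun k => decide (k ≠ '_')) (runKeysAux c rest))
              = [c] ++ List.filter (fun k => decide (k ≠ '_')) (runKeysAux c rest) from rfl]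
        rw [String.ofList_append, ← String.append_assoc]

-- the last key of a run decomposition is the last char
theorem getLast?_runKeysAux (t : List Char) :
    ∀ c : Char, (c :: runKeysAux c t).getLast? = some (t.getLastD c) := by
  induction t with
  | nil => intro c; rfl
  | cons d r ih =>
    intro c
    simp only [runKeysAux]
    by_cases hdc : d = c
    · subst hdc
      rw [if_neg (by simp), List.nil_append, List.getLastD_cons]
      exact ih d
    · rw [if_pos (by simpa using hdc), List.singleton_append, List.getLast?_cons_cons,
          List.getLastD_cons]
      exact ih d

theorem runKeysAux_append (l r : List Char) :
    ∀ p : Char, runKeysAux p (l ++ r) = runKeysAux p l ++ runKeysAux (l.getLastD p) r := by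
  induction l with
  | nil => intro p; simp [runKeysAux]
  | cons c l' ih =>
    intro p
    simp only [List.cons_append, runKeysAux, ih c, List.append_assoc, List.getLastD_cons]

theorem runKeys_append_glue (l r : List Char) (hl : l ≠ []) :
    runKeys (l ++ r) = glue (runKeys l) (runKeys r) := by
  obtain ⟨c, l', rfl⟩ := List.exists_cons_of_ne_nil hl
  simp only [List.cons_append, runKeys, runKeysAux_append]
  have hlast := getLast?_runKeysAux l' c
  cases r with
  | nil => simp [glue, runKeysAux]
  | cons d r' =>
    simp only [runKeysAux, glue, hlast, List.getLastD_eq_getLast?]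
    split_ifs <;> simp_all

theorem dedupDC_eq_runKeys (t : List Char) : dedupDC t = runKeys t := by
  induction t using dedupDC.induct with
  | case1 t h =>
    rw [dedupDC, dif_pos h]
    match t, h with
    | [], _ => rfl
    | [c], _ => rfl
  | case2 t h ih1 ih2 =>
    have hne : List.take (t.length / 2) t ≠ [] := by
      intro hnil
      have h2 := congrArg List.length hnil
      simp only [List.length_take, List.length_nil] at h2
      omega
    rw [dedupDC, dif_neg h, ih1, ih2]
    conv_rhs => rw [← List.take_append_drop (t.length / 2) t]
    rw [runKeys_append_glue _ _ hne]

-- ===== VERDICT (by name: the statement is the Claim_ definition above) =====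
theorem greedy_merge_spec : Claim_equal_greedy_merge := by
  intro s prev_char _
  unfold Spec_greedy_merge greedy_merge greedy_merge_alt
  rw [greedyA_eq, dedupDC_eq_runKeys]
  cases h : runKeys s.toList with
  | nil => simp [dropMatch]
  | cons k r => simp only [dropMatch]; simp
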